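-- pv_equiv track=rewrite | github.com/chousir/moltbot-test | modules/performance_auditor.py | _get_consensus_signal
-- ===== SOURCE A (Python) =====
-- from typing import Dict, List, Tuple
--
-- def _get_consensus_signal(analysts_report: List[Dict]) -> str:
--     """根據分析師報告推導共識信號"""
--     buy_count = sum(1 for r in analysts_report if r.get("signal") == "BUY")
--     sell_count = sum(1 for r in analysts_report if r.get("signal") == "SELL")
--
--     if buy_count > sell_count:
--         return "BUY"
--     elif sell_count > buy_count:
--         return "SELL"
--     else:
--         return "NEUTRAL"
-- ===== SOURCE B (Python) =====
-- def _get_consensus_signal(analysts_report):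
--     net = 0
--     for r in analysts_report:
--         sig = r.get("signal")
--         if sig == "BUY":
--             net += 1
--         elif sig == "SELL":
--             net -= 1
--     return "BUY" if net > 0 else "SELL" if net < 0 else "NEUTRAL"
-- ===== Notes on version B (the rewrite author's own statement) =====
-- stated objective: simpler
-- what changed: One pass maintaining a single signed net accumulator (+1 for BUY, -1 for SELL) replaces the two separate counting comprehensions and the two-count comparison.
import Mathlib
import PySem

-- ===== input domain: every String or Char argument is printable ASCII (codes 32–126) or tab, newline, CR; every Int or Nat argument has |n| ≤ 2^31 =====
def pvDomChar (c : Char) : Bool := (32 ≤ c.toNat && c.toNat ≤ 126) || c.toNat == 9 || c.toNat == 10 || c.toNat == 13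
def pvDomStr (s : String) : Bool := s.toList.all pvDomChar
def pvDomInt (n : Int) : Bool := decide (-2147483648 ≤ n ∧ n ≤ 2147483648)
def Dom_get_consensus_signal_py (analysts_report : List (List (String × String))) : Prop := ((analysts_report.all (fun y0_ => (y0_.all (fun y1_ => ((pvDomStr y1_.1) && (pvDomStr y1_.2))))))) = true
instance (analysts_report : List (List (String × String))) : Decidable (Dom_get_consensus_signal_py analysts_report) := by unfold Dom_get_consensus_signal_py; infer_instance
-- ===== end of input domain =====

-- B replaces A's two separate counting passes by one pass over the reports maintaining a single signed net accumulator (objective: simpler).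
-- ===== PORT A =====
-- buy_count / sell_count: the two counting comprehensions of A
def pvCountSig (analysts_report : List (List (String × String))) (sig : String) : Int :=
  analysts_report.foldl (fun acc r => if (PySem.Dict.mk r).get? "signal" == some sig then acc + 1 else acc) 0

def get_consensus_signal_py (analysts_report : List (List (String × String))) : String :=
  let buy_count := pvCountSig analysts_report "BUY"
  let sell_count := pvCountSig analysts_report "SELL"
  if buy_count > sell_count then "BUY"
  else if sell_count > buy_count then "SELL"
  else "NEUTRAL"

-- ===== PORT B =====
def get_consensus_signal_py_alt (analysts_report : List (List (String × String))) : String :=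
  let net : Int := analysts_report.foldl
    (fun n r =>
      let sig := (PySem.Dict.mk r).get? "signal"
      if sig == some "BUY" then n + 1
      else if sig == some "SELL" then n - 1
      else n) 0
  if net > 0 then "BUY" else if net < 0 then "SELL" else "NEUTRAL"

-- ===== PRECONDITION & SPEC =====
def Spec_get_consensus_signal_py (analysts_report : List (List (String × String))) (out : String) : Prop := out = get_consensus_signal_py_alt analysts_report
instance (analysts_report : List (List (String × String))) (out : String) : Decidable (Spec_get_consensus_signal_py analysts_report out) := by unfold Spec_get_consensus_signal_py; infer_instance

-- ===== CLAIM (what is proved, stated in full; the proofs are below) =====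
def Claim_equal_get_consensus_signal_py : Prop := ∀ (analysts_report : List (List (String × String))), Dom_get_consensus_signal_py analysts_report → Spec_get_consensus_signal_py analysts_report (get_consensus_signal_py analysts_report)

-- ===== LEMMAS AND PROOFS =====
theorem pv_net_eq_counts (xs : List (List (String × String))) : ∀ (b s : Int),
    xs.foldl (fun n r =>
      let sig := (PySem.Dict.mk r).get? "signal"
      if sig == some "BUY" then n + 1
      else if sig == some "SELL" then n - 1
      else n) (b - s)
    = xs.foldl (fun acc r => if (PySem.Dict.mk r).get? "signal" == some "BUY" then acc + 1 else acc) b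
      - xs.foldl (fun acc r => if (PySem.Dict.mk r).get? "signal" == some "SELL" then acc + 1 else acc) s := by
  induction xs with
  | nil => intro b s; simp
  | cons r xs ih =>
    intro b s
    simp only [List.foldl_cons]
    by_cases hb : ((PySem.Dict.mk r).get? "signal" == some "BUY") = true
    · have hs : ((PySem.Dict.mk r).get? "signal" == some "SELL") = false := by
        rcases h : (PySem.Dict.mk r).get? "signal" with _ | v <;> simp_all
      simp only [hb, hs, if_true, if_false, Bool.false_eq_true]
      rw [show b - s + 1 = b + 1 - s from by ring]
      simpa using ih (b + 1) s
    · by_cases hs : ((PySem.Dict.mk r).get? "signal" == some "SELL") = true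
      · simp only [hb, hs, if_true, if_false, Bool.false_eq_true]
        rw [show b - s - 1 = b - (s + 1) from by ring]
        simpa using ih b (s + 1)
      · simpa [hb, hs] using ih b s

-- ===== VERDICT (by name: the statement is the Claim_ definition above) =====
theorem get_consensus_signal_py_spec : Claim_equal_get_consensus_signal_py := by
  intro xs _
  unfold Spec_get_consensus_signal_py get_consensus_signal_py get_consensus_signal_py_alt pvCountSig
  have h := pv_net_eq_counts xs 0 0
  simp only [sub_zero] at h
  rw [h]
  set b := xs.foldl (fun acc r => if (PySem.Dict.mk r).get? "signal" == some "BUY" then acc + 1 else acc) 0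
  set s := xs.foldl (fun acc r => if (PySem.Dict.mk r).get? "signal" == some "SELL" then acc + 1 else acc) 0
  by_cases h1 : b > s <;> by_cases h2 : s > b <;> simp_all
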